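-- pv_equiv track=rewrite | github.com/maxencedcx/algo01-project | project_part1.py | calculateTimeTakenByList
-- ===== SOURCE A (Python) =====
-- def calculateTimeTakenByList(llist, position = 0, baseTime = 0):
--     timeTaken = baseTime
--     previousWaitingTime = 0
--     for i in range(0, len(llist)):
--         tmpPos = position if i == 0 else llist[i - 1]
--         previousWaitingTime += abs(tmpPos - llist[i])
--         timeTaken += previousWaitingTime
--     return timeTaken
-- ===== SOURCE B (Python) =====
-- def calculateTimeTakenByList(llist, position = 0, baseTime = 0):
--     # Each adjacent-movement delta at index i is counted in every later
--     # cumulative waiting term, i.e. (len(llist) - i) times in the total.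
--     acc = baseTime
--     prev = position
--     n = len(llist)
--     for i, x in enumerate(llist):
--         acc += abs(prev - x) * (n - i)
--         prev = x
--     return acc
-- ===== Notes on version B (the rewrite author's own statement) =====
-- stated objective: alternative
-- what changed: Replaces A's pair of running accumulators (cumulative waiting time re-added every iteration) with a single accumulator that adds each adjacent delta once, weighted by the number of remaining elements (n - i), using a prev variable instead of indexing llist[i-1].
import Mathlib
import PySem

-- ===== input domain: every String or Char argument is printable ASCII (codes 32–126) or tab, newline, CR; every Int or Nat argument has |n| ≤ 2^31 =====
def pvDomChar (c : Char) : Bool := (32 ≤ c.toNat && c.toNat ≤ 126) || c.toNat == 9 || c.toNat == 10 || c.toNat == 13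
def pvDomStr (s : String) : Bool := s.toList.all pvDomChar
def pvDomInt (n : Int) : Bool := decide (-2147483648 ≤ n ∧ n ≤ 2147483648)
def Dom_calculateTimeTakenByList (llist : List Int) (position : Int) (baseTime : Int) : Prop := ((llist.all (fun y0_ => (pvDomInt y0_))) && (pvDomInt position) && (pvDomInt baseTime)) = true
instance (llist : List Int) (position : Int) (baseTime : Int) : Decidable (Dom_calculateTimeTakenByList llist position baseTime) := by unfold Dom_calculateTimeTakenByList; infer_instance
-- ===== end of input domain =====

-- B replaces A's two running accumulators with one accumulator weighting each
-- adjacent delta by the number of remaining elements (alternative decomposition, same cost).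


-- ===== PORT A =====
-- indices i and i-1 are always in range (0 ≤ i < len, and i-1 only when i ≠ 0), so pyGetD is exact here
def calculateTimeTakenByList (llist : List Int) (position : Int) (baseTime : Int) : Int :=
  ((PySem.List.pyRange 0 (llist.length : Int) 1).foldl
      (fun (st : Int × Int) i =>
        let tmpPos := if i = 0 then position else PySem.List.pyGetD llist (i - 1) 0
        let w := st.2 + |tmpPos - PySem.List.pyGetD llist i 0|
        (st.1 + w, w))
      (baseTime, 0)).1

-- ===== PORT B =====
def calculateTimeTakenByList_alt (llist : List Int) (position : Int) (baseTime : Int) : Int :=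
  let n : Int := llist.length
  ((PySem.List.enumerate llist 0).foldl
      (fun (st : Int × Int) ix => (st.1 + |st.2 - ix.2| * (n - ix.1), ix.2))
      (baseTime, position)).1

-- ===== PRECONDITION & SPEC =====
def Spec_calculateTimeTakenByList (llist : List Int) (position : Int) (baseTime : Int) (out : Int) : Prop := out = calculateTimeTakenByList_alt llist position baseTime
instance (llist : List Int) (position : Int) (baseTime : Int) (out : Int) : Decidable (Spec_calculateTimeTakenByList llist position baseTime out) := by unfold Spec_calculateTimeTakenByList; infer_instance

-- ===== CLAIM (what is proved, stated in full; the proofs are below) =====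
def Claim_equal_calculateTimeTakenByList : Prop := ∀ (llist : List Int) (position : Int) (baseTime : Int), Dom_calculateTimeTakenByList llist position baseTime → Spec_calculateTimeTakenByList llist position baseTime (calculateTimeTakenByList llist position baseTime)

-- ===== LEMMAS AND PROOFS =====

-- A's index loop equals a fold over the zip of (position :: llist) with llist.
theorem pvA_eq_zipFold (llist : List Int) (position baseTime : Int) :
    calculateTimeTakenByList llist position baseTime
    = ((((position :: llist).zip llist).foldl
        (fun (st : Int × Int) q =>
          let w := st.2 + |q.1 - q.2|
          (st.1 + w, w)) (baseTime, 0)).1 : Int) := by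
  unfold calculateTimeTakenByList
  have hlen : (llist.length : Int) = (((position :: llist).zip llist).length : Int) := by
    simp [List.length_zip]
  rw [hlen]
  have hcong := PySem.List.foldl_congr_mem
    (l := PySem.List.pyRange 0 (((position :: llist).zip llist).length : Int) 1)
    (init := ((baseTime, 0) : Int × Int))
    (f := fun (st : Int × Int) i =>
      let tmpPos := if i = 0 then position else PySem.List.pyGetD llist (i - 1) 0
      let w := st.2 + |tmpPos - PySem.List.pyGetD llist i 0|
      (st.1 + w, w))
    (g := fun (st : Int × Int) i =>
      (fun (st : Int × Int) (q : Int × Int) =>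
        let w := st.2 + |q.1 - q.2|
        (st.1 + w, w)) st (PySem.List.pyGetD ((position :: llist).zip llist) i (0, 0)))
    (by
      intro acc x hx
      rw [PySem.List.mem_pyRange_one] at hx
      obtain ⟨h0, h1⟩ := hx
      have hlt : x.toNat < llist.length := by
        simp [List.length_zip] at h1
        omega
      have hz : PySem.List.pyGetD ((position :: llist).zip llist) x (0, 0)
          = ((position :: llist)[x.toNat]'(by simp; omega), llist[x.toNat]'hlt) := by
        rw [PySem.List.pyGetD_eq_getElem _ _ h0 (by simp [List.length_zip]; omega)]
        simp [List.getElem_zip]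
      simp only [hz]
      by_cases hx0 : x = 0
      · subst hx0
        have hg0 : PySem.List.pyGetD llist 0 0 = llist[(0 : Int).toNat]'hlt :=
          PySem.List.pyGetD_eq_getElem _ _ (le_refl 0) (by omega)
        simp [hg0]
      · have hpos : 0 < x.toNat := by omega
        have hhd : (position :: llist)[x.toNat]'(by simp; omega) = llist[x.toNat - 1]'(by omega) := by
          rcases Nat.exists_eq_succ_of_ne_zero (by omega : x.toNat ≠ 0) with ⟨k, hk⟩
          simp [hk]
        have hget : PySem.List.pyGetD llist (x - 1) 0 = llist[x.toNat - 1]'(by omega) := by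
          rw [PySem.List.pyGetD_eq_getElem _ _ (by omega) (by omega)]
          congr 1
          omega
        have hgx : PySem.List.pyGetD llist x 0 = llist[x.toNat]'hlt := by
          rw [PySem.List.pyGetD_eq_getElem _ _ h0 (by omega)]
        simp [hx0, hget, hgx, hhd]
      )
  rw [hcong]
  rw [PySem.List.foldl_pyRange_zero_pyGetD' ((position :: llist).zip llist) ((0, 0) : Int × Int)
    (fun (st : Int × Int) (q : Int × Int) =>
      let w := st.2 + |q.1 - q.2|
      (st.1 + w, w)) ((baseTime, 0) : Int × Int)]

-- Main invariant: the zip fold with running waiting time w equals the weighted fold.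
theorem pvZipFold_eq_weighted (l : List Int) :
    ∀ (p b w s n : Int), n = s + l.length →
    ((((p :: l).zip l).foldl
        (fun (st : Int × Int) q =>
          let w' := st.2 + |q.1 - q.2|
          (st.1 + w', w')) (b, w)).1 : Int)
    = ((PySem.List.enumerate l s).foldl
        (fun (st : Int × Int) ix => (st.1 + |st.2 - ix.2| * (n - ix.1), ix.2))
        (b + w * l.length, p)).1 := by
  induction l with
  | nil => intro p b w s n _; simp
  | cons x xs ih =>
    intro p b w s n hn
    have hL : ((xs.length : Nat) : Int) = n - s - 1 := by
      simp at hn; omega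
    have h2 : (((x :: xs).length : Nat) : Int) = n - s := by
      simp at hn ⊢; omega
    show ((((x :: xs).zip xs).foldl
        (fun (st : Int × Int) q =>
          let w' := st.2 + |q.1 - q.2|
          (st.1 + w', w')) (b + (w + |p - x|), w + |p - x|)).1 : Int)
      = ((PySem.List.enumerate xs (s + 1)).foldl
          (fun (st : Int × Int) ix => (st.1 + |st.2 - ix.2| * (n - ix.1), ix.2))
          (b + w * (((x :: xs).length : Nat) : Int) + |p - x| * (n - s), x)).1
    rw [ih x (b + (w + |p - x|)) (w + |p - x|) (s + 1) n (by simp at hn ⊢; omega)]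
    have hi : ((b + (w + |p - x|) + (w + |p - x|) * ((xs.length : Nat) : Int), x) : Int × Int)
        = (b + w * (((x :: xs).length : Nat) : Int) + |p - x| * (n - s), x) := by
      simp only [Prod.mk.injEq]
      refine ⟨?_, trivial⟩
      rw [hL, h2]
      ring
    rw [hi]

-- ===== VERDICT (by name: the statement is the Claim_ definition above) =====
theorem calculateTimeTakenByList_spec : Claim_equal_calculateTimeTakenByList := by
  intro llist position baseTime _
  unfold Spec_calculateTimeTakenByList calculateTimeTakenByList_alt
  rw [pvA_eq_zipFold,
    pvZipFold_eq_weighted llist position baseTime 0 0 (llist.length : Int) (by simp)]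
  norm_num
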